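-- pv_equiv track=rewrite | github.com/Daro-S/Automatafinal-Project | is_dfa_or_nfa.py | is_dfa
-- ===== SOURCE A (Python) =====
-- def is_dfa(states, alphabet, transition, start_state, accept_states):
--
--     # Check if all state-symbol pairs have transitions defined in the transition table
--
--     if not all((state, symbol) in transition for state in states for symbol in alphabet):
--         return False
--
--       # Perform a breadth-first search to check if all states can be reached from the start state
--     # without encountering an empty transition (i.e., the automaton is not an NFA)
--
--     seen = set()
--     queue = [start_state]
--     while queue:
--         current_state = queue.pop(0)
--         seen.add(current_state)
--         for symbol in alphabet:
--             next_state = transition.get((current_state, symbol))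
--             if next_state is None or next_state not in states:
--                 return False
--             if next_state not in seen:
--                 queue.append(next_state)
--
--     # Check if all accept states were reached during the search
--
--     return all(state in seen for state in accept_states)
-- ===== SOURCE B (Python) =====
-- def is_dfa(states, alphabet, transition, start_state, accept_states):
--     # Completeness: every (state, symbol) pair must be a key of the table.
--     if not all((state, symbol) in transition for state in states for symbol in alphabet):
--         return False
--
--     # Round-based fixpoint saturation instead of a worklist search: repeatedly
--     # take the full one-step image of the whole `seen` set (failing on any
--     # invalid or missing reachable target) until the image adds nothing new.
--     state_set = set(states)
--     seen = {start_state}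
--     while True:
--         image = set()
--         for s in seen:
--             for a in alphabet:
--                 t = transition.get((s, a))
--                 if t is None or t not in state_set:
--                     return False
--                 image.add(t)
--         if image <= seen:
--             return all(st in seen for st in accept_states)
--         seen |= image
-- ===== Notes on version B (the rewrite author's own statement) =====
-- stated objective: alternative
-- what changed: Replaces A's worklist BFS (a FIFO queue of pending states, marked on pop, with per-node expansion) by a round-based fixpoint saturation with no pending container at all: each round recomputes the full one-step image of the entire seen set against a precomputed set of states, fails on any invalid reachable target, and stops when the image adds nothing new.
import Mathlib
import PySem

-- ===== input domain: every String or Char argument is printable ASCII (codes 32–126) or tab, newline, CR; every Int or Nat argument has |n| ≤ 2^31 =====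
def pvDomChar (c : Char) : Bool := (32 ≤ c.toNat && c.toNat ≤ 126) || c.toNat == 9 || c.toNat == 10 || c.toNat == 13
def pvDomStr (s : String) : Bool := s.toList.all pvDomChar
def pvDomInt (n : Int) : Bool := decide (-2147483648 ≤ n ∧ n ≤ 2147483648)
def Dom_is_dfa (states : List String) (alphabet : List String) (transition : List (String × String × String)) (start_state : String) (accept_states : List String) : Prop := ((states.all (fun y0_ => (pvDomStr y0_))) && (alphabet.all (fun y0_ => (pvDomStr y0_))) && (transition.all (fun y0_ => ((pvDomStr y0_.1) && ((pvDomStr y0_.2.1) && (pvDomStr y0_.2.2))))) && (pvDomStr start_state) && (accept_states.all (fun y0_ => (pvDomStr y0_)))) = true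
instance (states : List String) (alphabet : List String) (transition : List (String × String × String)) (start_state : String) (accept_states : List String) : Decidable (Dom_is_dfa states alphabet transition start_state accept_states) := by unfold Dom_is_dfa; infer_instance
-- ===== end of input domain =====

-- B replaces A's FIFO worklist BFS (mark-on-pop, per-node expansion) by a round-based fixpoint
-- saturation with no pending container: each round recomputes the full one-step image of the whole
-- seen set and stops at a fixpoint; the return values are proved equal on all inputs.

-- ===== PORT A =====

-- the Python dict {(state, symbol): next_state}, flattened to triples by the type convention
def mkTrans (transition : List (String × String × String)) : PySem.Dict (String × String) String :=
  PySem.Dict.mk (transition.map (fun p => ((p.1, p.2.1), p.2.2)))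

-- A's inner 'for symbol in alphabet' body: early-return None on an invalid/missing target,
-- otherwise collect (in order) the targets to append to the queue (those not in seen)
def innerA (d : PySem.Dict (String × String) String) (states : List String)
    (seen : PySem.Set String) (c : String) : List String → Option (List String)
  | [] => some []
  | sym :: rest =>
    match d.get? (c, sym) with
    | none => none
    | some t =>
      if !(states.contains t) then none
      else
        match innerA d states seen c rest with
        | none => none
        | some apps => some (if PySem.Set.contains seen t then apps else t :: apps)

-- facts the termination measure of bfsA needs about the appended targets
theorem innerA_mem_of_some (d : PySem.Dict (String × String) String) (states : List String)
    (seen : PySem.Set String) (c : String) :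
    ∀ (syms : List String) (apps : List String), innerA d states seen c syms = some apps →
      ∀ t ∈ apps, states.contains t = true ∧ PySem.Set.contains seen t = false := by
  intro syms
  induction syms with
  | nil =>
    intro apps h t ht
    simp only [innerA, Option.some.injEq] at h
    subst h; simp at ht
  | cons sym rest ih =>
    intro apps h t ht
    simp only [innerA] at h
    cases hg : d.get? (c, sym) with
    | none => rw [hg] at h; exact absurd h (by simp)
    | some u =>
      rw [hg] at h; dsimp only at h
      cases hu : states.contains u with
      | false => rw [hu] at h; simp at h
      | true =>
        rw [hu] at h
        simp only [Bool.not_true, Bool.false_eq_true, if_false] at h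
        cases hr : innerA d states seen c rest with
        | none => rw [hr] at h; cases h
        | some apps' =>
          rw [hr] at h
          simp only [Option.some.injEq] at h
          cases hsu : PySem.Set.contains seen u with
          | true => rw [hsu] at h; simp only [if_true] at h; subst h
                    exact ih apps' hr t ht
          | false =>
            rw [hsu] at h
            simp only [Bool.false_eq_true, if_false] at h
            subst h
            rcases List.mem_cons.mp ht with h1 | h2
            · subst h1; exact ⟨hu, hsu⟩
            · exact ih apps' hr t h2

-- strict decrease of the unseen-states count when a new state is marked
theorem contains_add_eq (seen : PySem.Set String) (t x : String) :
    PySem.Set.contains (PySem.Set.add seen t) x = (PySem.Set.contains seen x || x == t) := by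
  by_cases h : x ∈ PySem.Set.add seen t
  · have h' := (PySem.Set.mem_add seen t x).mp h
    rw [(PySem.Set.contains_iff _ _).mpr h]
    rcases h' with h1 | h1
    · rw [(PySem.Set.contains_iff _ _).mpr h1]; simp
    · simp [h1]
  · have h' : ¬ (x ∈ seen ∨ x = t) := fun hc => h ((PySem.Set.mem_add seen t x).mpr hc)
    rw [not_or] at h'
    have c1 : PySem.Set.contains (PySem.Set.add seen t) x = false := by
      cases hb : PySem.Set.contains (PySem.Set.add seen t) x
      · rfl
      · exact absurd ((PySem.Set.contains_iff _ _).mp hb) h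
    have c2 : PySem.Set.contains seen x = false := by
      cases hb : PySem.Set.contains seen x
      · rfl
      · exact absurd ((PySem.Set.contains_iff _ _).mp hb) (fun hm => h'.1 hm)
    rw [c1, c2]
    simp [h'.2]

theorem length_filter_not_contains_add_le (l : List String) (seen : PySem.Set String)
    (t : String) :
    (l.filter (fun x => !(PySem.Set.contains (PySem.Set.add seen t) x))).length ≤
      (l.filter (fun x => !(PySem.Set.contains seen x))).length := by
  rw [← List.countP_eq_length_filter, ← List.countP_eq_length_filter]
  apply List.countP_mono_left
  intro a _ hp
  simp only [contains_add_eq, Bool.not_or, Bool.and_eq_true, Bool.not_eq_true'] at hp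
  rw [Bool.not_eq_true']
  exact hp.1

theorem length_filter_not_contains_add_lt (l : List String) (seen : PySem.Set String)
    (t : String) (ht : t ∈ l) (hs : PySem.Set.contains seen t = false) :
    (l.filter (fun x => !(PySem.Set.contains (PySem.Set.add seen t) x))).length <
      (l.filter (fun x => !(PySem.Set.contains seen x))).length := by
  obtain ⟨l₁, l₂, rfl⟩ := List.append_of_mem ht
  simp only [List.filter_append, List.length_append, List.filter_cons]
  have hnew : (!(PySem.Set.contains (PySem.Set.add seen t) t)) = false := by
    rw [contains_add_eq]; simp
  have hold : (!(PySem.Set.contains seen t)) = true := by rw [hs]; rfl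
  rw [hnew, hold]
  simp only [Bool.false_eq_true, if_false, if_true]
  have h1 := length_filter_not_contains_add_le l₁ seen t
  have h2 := length_filter_not_contains_add_le l₂ seen t
  simp only [List.length_cons]
  omega

-- a pending list whose appended tail is all-unseen loses at least one seen element up front
theorem takeWhile_append_lt (p : String → Bool) (apps : List String)
    (happs : ∀ t ∈ apps, p t = false) :
    ∀ rest : List String, ((rest ++ apps).takeWhile p).length < (rest.takeWhile p).length + 1 := by
  intro rest
  induction rest with
  | nil =>
    simp only [List.nil_append, List.takeWhile_nil, List.length_nil]
    cases apps with
    | nil => simp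
    | cons a as => simp [happs a (by simp)]
  | cons r rs ih =>
    simp only [List.cons_append, List.takeWhile_cons]
    cases hp : p r
    · simp
    · simp only [if_true, List.length_cons]
      omega

-- A's while loop: FIFO queue, mark-on-pop
def bfsA (states alphabet accept : List String) (d : PySem.Dict (String × String) String)
    (seen : PySem.Set String) (queue : List String) : Bool :=
  match queue with
  | [] => accept.all (fun st => PySem.Set.contains seen st)
  | c :: rest =>
    let seen' := PySem.Set.add seen c
    match hi : innerA d states seen' c alphabet with
    | none => false
    | some apps => bfsA states alphabet accept d seen' (rest ++ apps)
termination_by ((queue.filter (fun x => !(states.contains x))).length,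
  (((PySem.List.dedup states).filter (fun x => !(PySem.Set.contains seen x))).length,
   (queue.takeWhile (fun x => PySem.Set.contains seen x)).length))
decreasing_by
  have happs := innerA_mem_of_some d states seen' c alphabet apps hi
  by_cases hc : states.contains c = true
  · have e0 : (List.filter (fun x => !states.contains x) (rest ++ apps)).length
        = (List.filter (fun x => !states.contains x) (c :: rest)).length := by
      rw [List.filter_append, List.filter_cons]
      have h1 : (!states.contains c) = false := by rw [hc]; rfl
      have h2 : List.filter (fun x => !states.contains x) apps = [] := by
        rw [List.filter_eq_nil_iff]
        intro a ha
        simpa using (happs a ha).1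
      rw [h1, h2]
      simp
    rw [e0]
    apply Prod.Lex.right
    by_cases hcs : PySem.Set.contains seen c = true
    · have eseen : PySem.Set.add seen c = seen :=
        PySem.Set.add_of_mem ((PySem.Set.contains_iff _ _).mp hcs)
      rw [eseen]
      apply Prod.Lex.right
      have happs' : ∀ t ∈ apps, PySem.Set.contains seen t = false := by
        intro t ht
        have h := (happs t ht).2
        rwa [show seen' = seen from eseen] at h
      have hlt := takeWhile_append_lt (fun x => PySem.Set.contains seen x) apps happs' rest
      simp only [List.takeWhile_cons, hcs, if_true]
      simp only [List.length_cons]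
      omega
    · apply Prod.Lex.left
      have hcs' : PySem.Set.contains seen c = false := by
        cases hb : PySem.Set.contains seen c
        · rfl
        · exact absurd hb hcs
      apply length_filter_not_contains_add_lt
      · exact (PySem.List.mem_dedup _ _).mpr (by simpa using hc)
      · exact hcs'
  · apply Prod.Lex.left
    rw [List.filter_append, List.filter_cons]
    have hfc : (!states.contains c) = true := by
      cases hb : states.contains c
      · rfl
      · exact absurd hb hc
    have hfil : List.filter (fun x => !states.contains x) apps = [] := by
      rw [List.filter_eq_nil_iff]
      intro a ha
      simpa using (happs a ha).1
    rw [hfc, hfil]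
    simp

def is_dfa (states : List String) (alphabet : List String) (transition : List (String × String × String)) (start_state : String) (accept_states : List String) : Bool :=
  let d := mkTrans transition
  if !(states.all (fun state => alphabet.all (fun symbol => d.contains (state, symbol)))) then
    false
  else
    bfsA states alphabet accept_states d PySem.Set.empty [start_state]

-- ===== PORT B =====

-- B's inner 'for a in alphabet' body over one state s: add each target to the image being
-- built, none = an invalid or missing reachable target was found (B's 'return False')
def rowB (d : PySem.Dict (String × String) String) (state_set : PySem.Set String)
    (s : String) : List String → PySem.Set String → Option (PySem.Set String)
  | [], acc => some acc
  | a :: rest, acc =>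
    match d.get? (s, a) with
    | none => none
    | some t =>
      if !(PySem.Set.contains state_set t) then none
      else rowB d state_set s rest (PySem.Set.add acc t)

-- B's 'for s in seen' loop of one round: the one-step image of the whole seen set
-- (a set is consumed building another set; the result is order-independent)
def imageB (d : PySem.Dict (String × String) String) (state_set : PySem.Set String)
    (alphabet : List String) : List String → PySem.Set String → Option (PySem.Set String)
  | [], acc => some acc
  | s :: rest, acc =>
    match rowB d state_set s alphabet acc with
    | none => none
    | some acc' => imageB d state_set alphabet rest acc'

-- facts satB's termination needs: everything the round adds lies in state_set
theorem rowB_sub (d : PySem.Dict (String × String) String) (state_set : PySem.Set String)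
    (s : String) :
    ∀ (syms : List String) (acc res : PySem.Set String), rowB d state_set s syms acc = some res →
      ∀ x ∈ res, x ∈ acc ∨ PySem.Set.contains state_set x = true := by
  intro syms
  induction syms with
  | nil => intro acc res h x hx
           simp only [rowB, Option.some.injEq] at h
           exact Or.inl (h ▸ hx)
  | cons a rest ih =>
    intro acc res h x hx
    simp only [rowB] at h
    cases hg : d.get? (s, a) with
    | none => rw [hg] at h; cases h
    | some t =>
      rw [hg] at h; dsimp only at h
      cases hc : PySem.Set.contains state_set t with
      | false => rw [hc] at h; simp at h
      | true =>
        rw [hc] at h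
        simp only [Bool.not_true, Bool.false_eq_true, if_false] at h
        rcases ih (PySem.Set.add acc t) res h x hx with hacc | hss
        · rcases (PySem.Set.mem_add acc t x).mp hacc with h1 | rfl
          · exact Or.inl h1
          · exact Or.inr hc
        · exact Or.inr hss

theorem imageB_sub (d : PySem.Dict (String × String) String) (state_set : PySem.Set String)
    (alphabet : List String) :
    ∀ (l : List String) (acc res : PySem.Set String), imageB d state_set alphabet l acc = some res →
      ∀ x ∈ res, x ∈ acc ∨ PySem.Set.contains state_set x = true := by
  intro l
  induction l with
  | nil => intro acc res h x hx
           simp only [imageB, Option.some.injEq] at h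
           exact Or.inl (h ▸ hx)
  | cons s rest ih =>
    intro acc res h x hx
    simp only [imageB] at h
    cases hr : rowB d state_set s alphabet acc with
    | none => rw [hr] at h; cases h
    | some acc' =>
      rw [hr] at h; dsimp only at h
      rcases ih acc' res h x hx with hacc | hss
      · exact rowB_sub d state_set s alphabet acc acc' hr x hacc
      · exact Or.inr hss

-- strict decrease when the round's image escapes seen
theorem length_filter_union_lt (l : List String) (seen image : PySem.Set String)
    (t : String) (htl : t ∈ l) (hti : t ∈ image) (htn : t ∉ seen) :
    (l.filter (fun x => !(PySem.Set.contains (PySem.Set.union seen image) x))).length <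
      (l.filter (fun x => !(PySem.Set.contains seen x))).length := by
  have hmono : ∀ (l' : List String),
      (l'.filter (fun x => !(PySem.Set.contains (PySem.Set.union seen image) x))).length ≤
        (l'.filter (fun x => !(PySem.Set.contains seen x))).length := by
    intro l'
    rw [← List.countP_eq_length_filter, ← List.countP_eq_length_filter]
    apply List.countP_mono_left
    intro a _ hp
    rw [Bool.not_eq_true'] at hp ⊢
    cases hb : PySem.Set.contains seen a with
    | false => rfl
    | true =>
      have : a ∈ PySem.Set.union seen image :=
        (PySem.Set.mem_union _ _ _).mpr (Or.inl ((PySem.Set.contains_iff _ _).mp hb))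
      rw [(PySem.Set.contains_iff _ _).mpr this] at hp
      cases hp
  obtain ⟨l₁, l₂, rfl⟩ := List.append_of_mem htl
  simp only [List.filter_append, List.length_append, List.filter_cons]
  have hnew : (!(PySem.Set.contains (PySem.Set.union seen image) t)) = false := by
    rw [(PySem.Set.contains_iff _ _).mpr ((PySem.Set.mem_union _ _ _).mpr (Or.inr hti))]
    rfl
  have hold : (!(PySem.Set.contains seen t)) = true := by
    cases hb : PySem.Set.contains seen t with
    | false => rfl
    | true => exact absurd ((PySem.Set.contains_iff _ _).mp hb) htn
  rw [hnew, hold]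
  simp only [Bool.false_eq_true, if_false, if_true, List.length_cons]
  have h1 := hmono l₁
  have h2 := hmono l₂
  omega

-- B's 'while True' loop: round-based fixpoint saturation, no worklist
def satB (alphabet accept : List String) (d : PySem.Dict (String × String) String)
    (state_set : PySem.Set String) (seen : PySem.Set String) : Bool :=
  match himg : imageB d state_set alphabet seen PySem.Set.empty with
  | none => false
  | some image =>
    if PySem.Set.issubset image seen then
      accept.all (fun st => PySem.Set.contains seen st)
    else
      satB alphabet accept d state_set (PySem.Set.union seen image)
termination_by (state_set.filter (fun x => !(PySem.Set.contains seen x))).length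
decreasing_by
  rename_i hns
  have hsub := imageB_sub d state_set alphabet seen PySem.Set.empty image himg
  have : ¬ (∀ x ∈ image, x ∈ seen) := fun hall =>
    hns ((PySem.Set.issubset_iff _ _).mpr hall)
  push Not at this
  obtain ⟨t, hti, htn⟩ := this
  have htset : PySem.Set.contains state_set t = true := by
    rcases hsub t hti with h | h
    · simp [PySem.Set.empty] at h
    · exact h
  exact length_filter_union_lt state_set seen image t
    ((PySem.Set.contains_iff _ _).mp htset) hti htn

def is_dfa_alt (states : List String) (alphabet : List String) (transition : List (String × String × String)) (start_state : String) (accept_states : List String) : Bool :=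
  let d := mkTrans transition
  if !(states.all (fun state => alphabet.all (fun symbol => d.contains (state, symbol)))) then
    false
  else
    let state_set := PySem.Set.ofList states
    satB alphabet accept_states d state_set (PySem.Set.add PySem.Set.empty start_state)

-- ===== PRECONDITION & SPEC =====
def Spec_is_dfa (states : List String) (alphabet : List String) (transition : List (String × String × String)) (start_state : String) (accept_states : List String) (out : Bool) : Prop := out = is_dfa_alt states alphabet transition start_state accept_states
instance (states : List String) (alphabet : List String) (transition : List (String × String × String)) (start_state : String) (accept_states : List String) (out : Bool) : Decidable (Spec_is_dfa states alphabet transition start_state accept_states out) := by unfold Spec_is_dfa; infer_instance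

-- ===== CLAIM (what is proved, stated in full; the proofs are below) =====
def Claim_equal_is_dfa : Prop := ∀ (states : List String) (alphabet : List String) (transition : List (String × String × String)) (start_state : String) (accept_states : List String), Dom_is_dfa states alphabet transition start_state accept_states → Spec_is_dfa states alphabet transition start_state accept_states (is_dfa states alphabet transition start_state accept_states)

-- ===== LEMMAS AND PROOFS =====

-- one valid transition step out of s
def OneStep (alphabet : List String) (d : PySem.Dict (String × String) String)
    (s t : String) : Prop := ∃ a ∈ alphabet, d.get? (s, a) = some t

-- all of s's transitions exist and land in `states`
def okS (states alphabet : List String) (d : PySem.Dict (String × String) String)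
    (s : String) : Bool :=
  alphabet.all (fun a => match d.get? (s, a) with
    | some t => states.contains t
    | none => false)

def Edge (states alphabet : List String) (d : PySem.Dict (String × String) String)
    (s t : String) : Prop := okS states alphabet d s = true ∧ OneStep alphabet d s t

def ReachFrom (states alphabet : List String) (d : PySem.Dict (String × String) String)
    (l : List String) (x : String) : Prop :=
  ∃ r ∈ l, Relation.ReflTransGen (Edge states alphabet d) r x

-- the common extensional value of both loops, as a proposition
def RHS (states alphabet accept : List String) (d : PySem.Dict (String × String) String)
    (l : List String) : Prop :=
  (∀ x, ReachFrom states alphabet d l x → okS states alphabet d x = true) ∧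
  (∀ a ∈ accept, ReachFrom states alphabet d l a)

theorem contains_eq_false_iff (s : PySem.Set String) (x : String) :
    PySem.Set.contains s x = false ↔ x ∉ s := by
  constructor
  · intro h hm
    rw [(PySem.Set.contains_iff _ _).mpr hm] at h
    cases h
  · intro h
    cases hb : PySem.Set.contains s x
    · rfl
    · exact absurd ((PySem.Set.contains_iff _ _).mp hb) h

theorem reach_congr (states alphabet : List String) (d : PySem.Dict (String × String) String)
    (l l' extra : List String)
    (hmem : ∀ y, y ∈ l' ↔ y ∈ l ∨ y ∈ extra)
    (hextra : ∀ t ∈ extra, ReachFrom states alphabet d l t) :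
    ∀ x, ReachFrom states alphabet d l' x ↔ ReachFrom states alphabet d l x := by
  intro x
  constructor
  · rintro ⟨r, hr, hrx⟩
    rcases (hmem r).mp hr with h | h
    · exact ⟨r, h, hrx⟩
    · obtain ⟨r0, hr0, hpath⟩ := hextra r h
      exact ⟨r0, hr0, hpath.trans hrx⟩
  · rintro ⟨r, hr, hrx⟩
    exact ⟨r, (hmem r).mpr (Or.inl hr), hrx⟩

theorem rhs_congr (states alphabet accept : List String) (d : PySem.Dict (String × String) String)
    (l l' extra : List String)
    (hmem : ∀ y, y ∈ l' ↔ y ∈ l ∨ y ∈ extra)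
    (hextra : ∀ t ∈ extra, ReachFrom states alphabet d l t) :
    (RHS states alphabet accept d l' ↔ RHS states alphabet accept d l) := by
  have h := reach_congr states alphabet d l l' extra hmem hextra
  constructor
  · rintro ⟨h1, h2⟩
    exact ⟨fun x hx => h1 x ((h x).mpr hx), fun a ha => (h a).mp (h2 a ha)⟩
  · rintro ⟨h1, h2⟩
    exact ⟨fun x hx => h1 x ((h x).mp hx), fun a ha => (h a).mpr (h2 a ha)⟩

theorem reach_closed (states alphabet : List String) (d : PySem.Dict (String × String) String)
    (l : List String)
    (hcl : ∀ s ∈ l, ∀ t, OneStep alphabet d s t → t ∈ l) :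
    ∀ x, ReachFrom states alphabet d l x ↔ x ∈ l := by
  intro x
  constructor
  · rintro ⟨r, hr, hrx⟩
    induction hrx with
    | refl => exact hr
    | tail _ hbc ih => exact hcl _ ih _ hbc.2
  · intro h
    exact ⟨x, h, Relation.ReflTransGen.refl⟩

-- ===== characterization of A's inner loop =====

theorem innerA_none_iff (d : PySem.Dict (String × String) String) (states : List String)
    (seen : PySem.Set String) (c : String) (syms : List String) :
    innerA d states seen c syms = none ↔
      ¬ (syms.all (fun a => match d.get? (c, a) with
        | some t => states.contains t
        | none => false) = true) := by
  induction syms with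
  | nil => simp [innerA]
  | cons sym rest ih =>
    simp only [innerA, List.all_cons, Bool.and_eq_true]
    cases hg : d.get? (c, sym) with
    | none => simp
    | some u =>
      dsimp only
      cases hu : states.contains u with
      | false => simp
      | true =>
        simp only [Bool.not_true, Bool.false_eq_true, if_false, true_and]
        cases hr : innerA d states seen c rest with
        | none => exact ⟨fun _ => ih.mp hr, fun _ => rfl⟩
        | some apps' =>
          have : ¬ (innerA d states seen c rest = none) := by simp [hr]
          constructor
          · intro hx; cases hx
          · intro hx
            exact absurd (ih.mpr hx) this

theorem innerA_mem_iff (d : PySem.Dict (String × String) String) (states : List String)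
    (seen : PySem.Set String) (c : String) (syms apps : List String)
    (h : innerA d states seen c syms = some apps) :
    ∀ t, t ∈ apps ↔ ((∃ a ∈ syms, d.get? (c, a) = some t) ∧ t ∉ seen) := by
  induction syms generalizing apps with
  | nil =>
    simp only [innerA, Option.some.injEq] at h
    subst h
    simp
  | cons sym rest ih =>
    intro t
    simp only [innerA] at h
    cases hg : d.get? (c, sym) with
    | none => rw [hg] at h; cases h
    | some u =>
      rw [hg] at h; dsimp only at h
      cases hu : states.contains u with
      | false => rw [hu] at h; simp at h
      | true =>
        rw [hu] at h
        simp only [Bool.not_true, Bool.false_eq_true, if_false] at h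
        cases hr : innerA d states seen c rest with
        | none => rw [hr] at h; cases h
        | some apps' =>
          rw [hr] at h
          simp only [Option.some.injEq] at h
          have ihr := ih apps' hr
          cases hsu : PySem.Set.contains seen u with
          | true =>
            rw [hsu] at h
            simp only [if_true] at h
            subst h
            have humem : u ∈ seen := (PySem.Set.contains_iff _ _).mp hsu
            rw [ihr t]
            constructor
            · rintro ⟨⟨a, ha, hget⟩, hns⟩
              exact ⟨⟨a, List.mem_cons_of_mem _ ha, hget⟩, hns⟩
            · rintro ⟨⟨a, ha, hget⟩, hns⟩
              rcases List.mem_cons.mp ha with rfl | ha'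
              · rw [hg] at hget
                injection hget with he
                exact absurd (he ▸ humem) hns
              · exact ⟨⟨a, ha', hget⟩, hns⟩
          | false =>
            rw [hsu] at h
            simp only [Bool.false_eq_true, if_false] at h
            subst h
            have hunmem : u ∉ seen := (contains_eq_false_iff _ _).mp hsu
            constructor
            · intro ht
              rcases List.mem_cons.mp ht with rfl | ht'
              · exact ⟨⟨sym, List.mem_cons_self, hg⟩, hunmem⟩
              · obtain ⟨⟨a, ha, hget⟩, hns⟩ := (ihr t).mp ht'
                exact ⟨⟨a, List.mem_cons_of_mem _ ha, hget⟩, hns⟩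
            · rintro ⟨⟨a, ha, hget⟩, hns⟩
              rcases List.mem_cons.mp ha with rfl | ha'
              · rw [hg] at hget
                injection hget with he
                rw [he]
                exact List.mem_cons_self
              · exact List.mem_cons_of_mem _ ((ihr t).mpr ⟨⟨a, ha', hget⟩, hns⟩)

-- ===== invariant and main lemma for A =====

def InvA (states alphabet : List String) (d : PySem.Dict (String × String) String)
    (seen : PySem.Set String) (queue : List String) : Prop :=
  ∀ s ∈ seen, okS states alphabet d s = true ∧
    (∀ t, OneStep alphabet d s t → t ∈ seen ∨ t ∈ queue)

theorem bfsA_spec (states alphabet accept : List String)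
    (d : PySem.Dict (String × String) String) :
    ∀ (seen : PySem.Set String) (queue : List String), InvA states alphabet d seen queue →
      (bfsA states alphabet accept d seen queue = true ↔
        RHS states alphabet accept d (seen ++ queue)) := by
  intro seen queue
  induction seen, queue using bfsA.induct with
  | states => exact states
  | alphabet => exact alphabet
  | d => exact d
  | case1 seen =>
    intro hInv
    have hclosed : ∀ s ∈ seen, ∀ t, OneStep alphabet d s t → t ∈ seen := by
      intro s hs t ht
      rcases (hInv s hs).2 t ht with h | h
      · exact h
      · simp at h
    have hre := reach_closed states alphabet d seen hclosed
    rw [List.append_nil]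
    simp only [bfsA]
    constructor
    · intro hall
      refine ⟨fun x hx => (hInv x ((hre x).mp hx)).1, fun a ha => ?_⟩
      have hc := List.all_eq_true.mp hall a ha
      exact ⟨a, (PySem.Set.contains_iff _ _).mp hc, Relation.ReflTransGen.refl⟩
    · rintro ⟨_, h2⟩
      apply List.all_eq_true.mpr
      intro a ha
      exact (PySem.Set.contains_iff _ _).mpr ((hre a).mp (h2 a ha))
  | case2 seen c rest seen' hi =>
    intro _
    have hi' : innerA d states (PySem.Set.add seen c) c alphabet = none := hi
    have hok : okS states alphabet d c = false := by
      have hn := (innerA_none_iff d states (PySem.Set.add seen c) c alphabet).mp hi'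
      exact Bool.eq_false_iff.mpr hn
    have hunf : bfsA states alphabet accept d seen (c :: rest) = false := by
      rw [bfsA]
      split
      · rfl
      · next apps2 heq => exact absurd (hi'.symm.trans heq) (by simp)
    rw [hunf]
    constructor
    · intro h; cases h
    · rintro ⟨h1, _⟩
      have hreach : ReachFrom states alphabet d (seen ++ c :: rest) c :=
        ⟨c, by simp, Relation.ReflTransGen.refl⟩
      have := h1 c hreach
      rw [hok] at this
      cases this
  | case3 seen c rest seen' apps hi ih1 =>
    intro hInv
    have hi' : innerA d states (PySem.Set.add seen c) c alphabet = some apps := hi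
    have hokc : okS states alphabet d c = true := by
      have hne : innerA d states (PySem.Set.add seen c) c alphabet ≠ none := by simp [hi']
      by_contra hno
      exact hne ((innerA_none_iff d states (PySem.Set.add seen c) c alphabet).mpr
        (by simpa [okS] using hno))
    have hmm := innerA_mem_iff d states (PySem.Set.add seen c) c alphabet apps hi'
    have hInv' : InvA states alphabet d (PySem.Set.add seen c) (rest ++ apps) := by
      intro s hs
      rcases (PySem.Set.mem_add seen c s).mp hs with hsseen | rfl
      · obtain ⟨ho, hcl⟩ := hInv s hsseen
        refine ⟨ho, fun t ht => ?_⟩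
        rcases hcl t ht with h | h
        · exact Or.inl ((PySem.Set.mem_add seen c t).mpr (Or.inl h))
        · rcases List.mem_cons.mp h with heq | hr
          · exact Or.inl ((PySem.Set.mem_add seen c t).mpr (Or.inr heq))
          · exact Or.inr (List.mem_append.mpr (Or.inl hr))
      · refine ⟨hokc, fun t ht => ?_⟩
        by_cases hts : t ∈ PySem.Set.add seen s
        · exact Or.inl hts
        · obtain ⟨a, ha, hget⟩ := ht
          exact Or.inr (List.mem_append.mpr (Or.inr ((hmm t).mpr ⟨⟨a, ha, hget⟩, hts⟩)))
    have hIH : bfsA states alphabet accept d (PySem.Set.add seen c) (rest ++ apps) = true ↔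
        RHS states alphabet accept d (PySem.Set.add seen c ++ (rest ++ apps)) := ih1 hInv'
    have hunf : bfsA states alphabet accept d seen (c :: rest) =
        bfsA states alphabet accept d (PySem.Set.add seen c) (rest ++ apps) := by
      rw [bfsA]
      split
      · next heq => exact absurd (hi'.symm.trans heq) (by simp)
      · next apps2 heq =>
        have : apps2 = apps := by
          have := hi'.symm.trans heq
          injection this with h
          exact h.symm
        rw [this]
    rw [hunf, hIH]
    apply rhs_congr states alphabet accept d (seen ++ c :: rest) _ apps
    · intro y
      constructor
      · intro hy
        rcases List.mem_append.mp hy with hy1 | hy2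
        · rcases (PySem.Set.mem_add seen c y).mp hy1 with h | rfl
          · exact Or.inl (by simp [h])
          · exact Or.inl (by simp)
        · rcases List.mem_append.mp hy2 with h | h
          · exact Or.inl (by simp [h])
          · exact Or.inr h
      · intro hy
        rcases hy with hy | hy
        · rcases List.mem_append.mp hy with h | h
          · exact List.mem_append.mpr (Or.inl ((PySem.Set.mem_add seen c y).mpr (Or.inl h)))
          · rcases List.mem_cons.mp h with heq | h
            · exact List.mem_append.mpr (Or.inl ((PySem.Set.mem_add seen c y).mpr (Or.inr heq)))
            · exact List.mem_append.mpr (Or.inr (List.mem_append.mpr (Or.inl h)))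
        · exact List.mem_append.mpr (Or.inr (List.mem_append.mpr (Or.inr hy)))
    · intro t ht
      obtain ⟨⟨a, ha, hget⟩, _⟩ := (hmm t).mp ht
      exact ⟨c, by simp, Relation.ReflTransGen.single ⟨hokc, a, ha, hget⟩⟩

-- ===== characterization of B's round =====

theorem rowB_none_iff (d : PySem.Dict (String × String) String) (state_set : PySem.Set String)
    (s : String) :
    ∀ (syms : List String) (acc : PySem.Set String), rowB d state_set s syms acc = none ↔
      ¬ (syms.all (fun a => match d.get? (s, a) with
        | some t => PySem.Set.contains state_set t
        | none => false) = true) := by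
  intro syms
  induction syms with
  | nil => intro acc; simp [rowB]
  | cons a rest ih =>
    intro acc
    simp only [rowB, List.all_cons, Bool.and_eq_true]
    cases hg : d.get? (s, a) with
    | none => simp
    | some t =>
      dsimp only
      cases hc : PySem.Set.contains state_set t with
      | false => simp
      | true =>
        simp only [Bool.not_true, Bool.false_eq_true, if_false, true_and]
        exact ih (PySem.Set.add acc t)

theorem rowB_mem (d : PySem.Dict (String × String) String) (state_set : PySem.Set String)
    (s : String) :
    ∀ (syms : List String) (acc res : PySem.Set String), rowB d state_set s syms acc = some res →
      ∀ x, x ∈ res ↔ x ∈ acc ∨ ∃ a ∈ syms, d.get? (s, a) = some x := by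
  intro syms
  induction syms with
  | nil =>
    intro acc res h x
    simp only [rowB, Option.some.injEq] at h
    subst h
    simp
  | cons a rest ih =>
    intro acc res h x
    simp only [rowB] at h
    cases hg : d.get? (s, a) with
    | none => rw [hg] at h; cases h
    | some t =>
      rw [hg] at h; dsimp only at h
      cases hc : PySem.Set.contains state_set t with
      | false => rw [hc] at h; simp at h
      | true =>
        rw [hc] at h
        simp only [Bool.not_true, Bool.false_eq_true, if_false] at h
        rw [ih (PySem.Set.add acc t) res h x, PySem.Set.mem_add acc t x]
        constructor
        · rintro ((h1 | rfl) | ⟨a', ha', hg'⟩)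
          · exact Or.inl h1
          · exact Or.inr ⟨a, List.mem_cons_self, hg⟩
          · exact Or.inr ⟨a', List.mem_cons_of_mem _ ha', hg'⟩
        · rintro (h1 | ⟨a', ha', hg'⟩)
          · exact Or.inl (Or.inl h1)
          · rcases List.mem_cons.mp ha' with rfl | ha''
            · rw [hg] at hg'
              exact Or.inl (Or.inr (Option.some.inj hg').symm)
            · exact Or.inr ⟨a', ha'', hg'⟩

theorem imageB_none_iff (d : PySem.Dict (String × String) String) (state_set : PySem.Set String)
    (alphabet : List String) :
    ∀ (l : List String) (acc : PySem.Set String), imageB d state_set alphabet l acc = none ↔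
      ∃ s ∈ l, ¬ (alphabet.all (fun a => match d.get? (s, a) with
        | some t => PySem.Set.contains state_set t
        | none => false) = true) := by
  intro l
  induction l with
  | nil => intro acc; simp [imageB]
  | cons s rest ih =>
    intro acc
    simp only [imageB]
    cases hr : rowB d state_set s alphabet acc with
    | none =>
      have := (rowB_none_iff d state_set s alphabet acc).mp hr
      simp only [true_iff]
      exact ⟨s, List.mem_cons_self, this⟩
    | some acc' =>
      dsimp only
      rw [ih acc']
      have hok : (alphabet.all (fun a => match d.get? (s, a) with
          | some t => PySem.Set.contains state_set t
          | none => false) = true) := by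
        by_contra hno
        have := (rowB_none_iff d state_set s alphabet acc).mpr hno
        rw [hr] at this
        cases this
      constructor
      · rintro ⟨s', hs', hbad⟩
        exact ⟨s', List.mem_cons_of_mem _ hs', hbad⟩
      · rintro ⟨s', hs', hbad⟩
        rcases List.mem_cons.mp hs' with rfl | h
        · exact absurd hok hbad
        · exact ⟨s', h, hbad⟩

theorem imageB_mem (d : PySem.Dict (String × String) String) (state_set : PySem.Set String)
    (alphabet : List String) :
    ∀ (l : List String) (acc res : PySem.Set String), imageB d state_set alphabet l acc = some res →
      ∀ x, x ∈ res ↔ x ∈ acc ∨ ∃ s ∈ l, ∃ a ∈ alphabet, d.get? (s, a) = some x := by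
  intro l
  induction l with
  | nil =>
    intro acc res h x
    simp only [imageB, Option.some.injEq] at h
    subst h
    simp
  | cons s rest ih =>
    intro acc res h x
    simp only [imageB] at h
    cases hr : rowB d state_set s alphabet acc with
    | none => rw [hr] at h; cases h
    | some acc' =>
      rw [hr] at h; dsimp only at h
      rw [ih acc' res h x, rowB_mem d state_set s alphabet acc acc' hr x]
      constructor
      · rintro ((h1 | ⟨a, ha, hg⟩) | ⟨s', hs', hrest⟩)
        · exact Or.inl h1
        · exact Or.inr ⟨s, List.mem_cons_self, a, ha, hg⟩
        · exact Or.inr ⟨s', List.mem_cons_of_mem _ hs', hrest⟩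
      · rintro (h1 | ⟨s', hs', hrest⟩)
        · exact Or.inl (Or.inl h1)
        · rcases List.mem_cons.mp hs' with rfl | hs''
          · exact Or.inl (Or.inr hrest)
          · exact Or.inr ⟨s', hs'', hrest⟩

-- B's per-state validity check equals okS
theorem rowOk_eq_okS (states alphabet : List String)
    (d : PySem.Dict (String × String) String) (state_set : PySem.Set String)
    (hset : ∀ t, PySem.Set.contains state_set t = states.contains t) (s : String) :
    (alphabet.all (fun a => match d.get? (s, a) with
      | some t => PySem.Set.contains state_set t
      | none => false)) = okS states alphabet d s := by
  unfold okS
  induction alphabet with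
  | nil => rfl
  | cons a as ih =>
    simp only [List.all_cons, ih]
    cases d.get? (s, a) with
    | none => rfl
    | some u => dsimp only; rw [hset u]

-- ===== invariant and main lemma for B =====

def InvB (states alphabet : List String) (d : PySem.Dict (String × String) String)
    (L : List String) (seen : PySem.Set String) : Prop :=
  (∀ x ∈ L, x ∈ seen) ∧ (∀ s ∈ seen, ReachFrom states alphabet d L s)

theorem satB_spec (states alphabet accept L : List String)
    (d : PySem.Dict (String × String) String) (state_set : PySem.Set String)
    (hset : ∀ t, PySem.Set.contains state_set t = states.contains t) :
    ∀ (seen : PySem.Set String), InvB states alphabet d L seen →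
      (satB alphabet accept d state_set seen = true ↔
        RHS states alphabet accept d L) := by
  intro seen
  induction seen using satB.induct with
  | alphabet => exact alphabet
  | d => exact d
  | state_set => exact state_set
  | case1 seen himg =>
    intro hInv
    -- the round found an invalid reachable target: both sides are false
    obtain ⟨s, hs, hbad⟩ := (imageB_none_iff d state_set alphabet seen PySem.Set.empty).mp himg
    rw [rowOk_eq_okS states alphabet d state_set hset s] at hbad
    have hok : okS states alphabet d s = false := Bool.eq_false_iff.mpr hbad
    have hunf : satB alphabet accept d state_set seen = false := by
      rw [satB]
      split
      · rfl
      · next image heq => exact absurd (himg.symm.trans heq) (by simp)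
    rw [hunf]
    constructor
    · intro h; cases h
    · rintro ⟨h1, _⟩
      have := h1 s (hInv.2 s hs)
      rw [hok] at this
      cases this
  | case2 seen image himg hsub =>
    intro hInv
    -- fixpoint round: seen is exactly the reachable set
    have hmm := imageB_mem d state_set alphabet seen PySem.Set.empty image himg
    have hok : ∀ s ∈ seen, okS states alphabet d s = true := by
      intro s hs
      by_contra hno
      have : imageB d state_set alphabet seen PySem.Set.empty = none := by
        apply (imageB_none_iff d state_set alphabet seen PySem.Set.empty).mpr
        refine ⟨s, hs, ?_⟩
        rw [rowOk_eq_okS states alphabet d state_set hset s]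
        exact hno
      rw [himg] at this
      cases this
    have himgsub : ∀ x ∈ image, x ∈ seen := (PySem.Set.issubset_iff _ _).mp hsub
    have hclosed : ∀ s ∈ seen, ∀ t, OneStep alphabet d s t → t ∈ seen := by
      rintro s hs t ⟨a, ha, hg⟩
      exact himgsub t ((hmm t).mpr (Or.inr ⟨s, hs, a, ha, hg⟩))
    have hreach : ∀ x, ReachFrom states alphabet d L x → x ∈ seen := by
      rintro x ⟨r, hr, hpath⟩
      induction hpath with
      | refl => exact hInv.1 r hr
      | tail _ hbc ih => exact hclosed _ ih _ hbc.2
    have hunf : satB alphabet accept d state_set seen =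
        accept.all (fun st => PySem.Set.contains seen st) := by
      rw [satB]
      split
      · next heq => exact absurd (himg.symm.trans heq) (by simp)
      · next image2 heq =>
        have : image2 = image := by
          have := himg.symm.trans heq
          injection this with h
          exact h.symm
        subst this
        rw [if_pos hsub]
    rw [hunf]
    constructor
    · intro hall
      refine ⟨fun x hx => hok x (hreach x hx), fun a ha => ?_⟩
      have hc := List.all_eq_true.mp hall a ha
      exact hInv.2 a ((PySem.Set.contains_iff _ _).mp hc)
    · rintro ⟨_, h2⟩
      apply List.all_eq_true.mpr
      intro a ha
      exact (PySem.Set.contains_iff _ _).mpr (hreach a (h2 a ha))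
  | case3 seen image himg hsub ih =>
    intro hInv
    -- growing round: everything added is one valid step from seen, so still reachable
    have hmm := imageB_mem d state_set alphabet seen PySem.Set.empty image himg
    have hok : ∀ s ∈ seen, okS states alphabet d s = true := by
      intro s hs
      by_contra hno
      have : imageB d state_set alphabet seen PySem.Set.empty = none := by
        apply (imageB_none_iff d state_set alphabet seen PySem.Set.empty).mpr
        refine ⟨s, hs, ?_⟩
        rw [rowOk_eq_okS states alphabet d state_set hset s]
        exact hno
      rw [himg] at this
      cases this
    have hInv' : InvB states alphabet d L (PySem.Set.union seen image) := by
      constructor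
      · intro x hx
        exact (PySem.Set.mem_union _ _ _).mpr (Or.inl (hInv.1 x hx))
      · intro s hs
        rcases (PySem.Set.mem_union _ _ _).mp hs with h | h
        · exact hInv.2 s h
        · rcases (hmm s).mp h with habs | ⟨s', hs', a, ha, hg⟩
          · simp [PySem.Set.empty] at habs
          · obtain ⟨r, hr, hpath⟩ := hInv.2 s' hs'
            exact ⟨r, hr, hpath.tail ⟨hok s' hs', a, ha, hg⟩⟩
    have hunf : satB alphabet accept d state_set seen =
        satB alphabet accept d state_set (PySem.Set.union seen image) := by
      rw [satB]
      split
      · next heq => exact absurd (himg.symm.trans heq) (by simp)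
      · next image2 heq =>
        have : image2 = image := by
          have := himg.symm.trans heq
          injection this with h
          exact h.symm
        subst this
        rw [if_neg hsub]
    rw [hunf]
    exact ih hInv'

theorem contains_ofList_eq (states : List String) :
    ∀ t, PySem.Set.contains (PySem.Set.ofList states) t = states.contains t := by
  intro t
  by_cases h : t ∈ states
  · rw [(PySem.Set.contains_iff _ _).mpr ((PySem.Set.mem_ofList _ _).mpr h)]
    exact (List.elem_iff.mpr h).symm
  · rw [(contains_eq_false_iff _ _).mpr (fun hm => h ((PySem.Set.mem_ofList _ _).mp hm))]
    symm
    rw [Bool.eq_false_iff]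
    intro hc
    exact h (List.elem_iff.mp hc)

theorem start_set_eq (start_state : String) :
    PySem.Set.add PySem.Set.empty start_state = [start_state] := by
  rw [PySem.Set.add_of_not_mem (by simp [PySem.Set.empty])]
  rfl

-- ===== VERDICT (by name: the statement is the Claim_ definition above) =====
theorem is_dfa_spec : Claim_equal_is_dfa := by
  intro states alphabet transition start_state accept_states _
  unfold Spec_is_dfa is_dfa is_dfa_alt
  by_cases hcomp : (!(states.all (fun state => alphabet.all (fun symbol =>
      (mkTrans transition).contains (state, symbol))))) = true
  · rw [if_pos hcomp, if_pos hcomp]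
  · rw [if_neg hcomp, if_neg hcomp]
    have hA := bfsA_spec states alphabet accept_states (mkTrans transition)
      PySem.Set.empty [start_state] (by intro s hs; simp [PySem.Set.empty] at hs)
    have hA' : bfsA states alphabet accept_states (mkTrans transition)
        PySem.Set.empty [start_state] = true ↔
        RHS states alphabet accept_states (mkTrans transition) [start_state] := by
      simpa using hA
    have hB := satB_spec states alphabet accept_states [start_state] (mkTrans transition)
      (PySem.Set.ofList states) (contains_ofList_eq states)
      (PySem.Set.add PySem.Set.empty start_state) ?_
    · rw [Bool.eq_iff_iff, hA']
      dsimp only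
      exact hB.symm
    · constructor
      · intro x hx
        rw [start_set_eq start_state]
        exact hx
      · intro s hs
        rw [start_set_eq start_state] at hs
        exact ⟨s, hs, Relation.ReflTransGen.refl⟩
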